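-- pv_equiv track=rewrite | github.com/RoxaneDuroux/ECE2 | Livre_ECE_ecrits/Programmes_python/tri_par_themes_ecrits.py | recupereLigne
-- ===== SOURCE A (Python) =====
-- def recupereLigne(chaine, symboleFinLigne, symbolesNonConsideres) :
--     ligne = ''
--     k = 0
--     for s in chaine :
--         if s in symbolesNonConsideres :
--             k = k+1
--         elif (s != symboleFinLigne) :
--             ligne += s
--             k = k+1
--         else :
--             break
--     return (ligne, k)
-- ===== SOURCE B (Python) =====
-- def recupereLigne(chaine, symboleFinLigne, symbolesNonConsideres):
--     # Pass 1: locate the cut index (first unignored terminator, else len(chaine)).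
--     cut = len(chaine)
--     for i, c in enumerate(chaine):
--         if c in symbolesNonConsideres:
--             continue
--         if c == symboleFinLigne:
--             cut = i
--             break
--     # Pass 2: filter the ignored symbols out of the prefix.
--     ligne = ''.join(c for c in chaine[:cut] if c not in symbolesNonConsideres)
--     return (ligne, cut)
-- ===== Notes on version B (the rewrite author's own statement) =====
-- stated objective: alternative
-- what changed: A's single fused loop with a mutable accumulator and counter is replaced by a locate-the-cut-index scan followed by a separate filtering pass over the prefix.
import Mathlib
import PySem

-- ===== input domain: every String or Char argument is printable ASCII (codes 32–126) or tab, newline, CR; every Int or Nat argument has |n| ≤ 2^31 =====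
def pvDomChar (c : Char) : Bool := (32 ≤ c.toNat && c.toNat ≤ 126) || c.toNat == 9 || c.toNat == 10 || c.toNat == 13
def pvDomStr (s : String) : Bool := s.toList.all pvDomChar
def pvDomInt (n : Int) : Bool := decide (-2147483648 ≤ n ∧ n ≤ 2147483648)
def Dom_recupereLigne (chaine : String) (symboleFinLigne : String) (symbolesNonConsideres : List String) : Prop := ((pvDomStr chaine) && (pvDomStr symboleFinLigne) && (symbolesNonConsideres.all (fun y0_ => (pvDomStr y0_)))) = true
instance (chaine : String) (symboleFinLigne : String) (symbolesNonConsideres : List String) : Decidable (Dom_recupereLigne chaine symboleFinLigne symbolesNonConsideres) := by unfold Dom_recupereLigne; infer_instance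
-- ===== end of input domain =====

-- B replaces A's fused accumulate-and-count loop by a find-cut-index scan plus a separate filter pass (alternative decomposition; return value only).


-- ===== PORT A =====
def aLoop (fin : String) (syms : List String) : List Char → List Char → Int → List Char × Int
  | [], ligne, k => (ligne, k)
  | c :: rest, ligne, k =>
    if String.mk [c] ∈ syms then aLoop fin syms rest ligne (k + 1)
    else if String.mk [c] ≠ fin then aLoop fin syms rest (ligne ++ [c]) (k + 1)
    else (ligne, k)

def recupereLigne (chaine : String) (symboleFinLigne : String) (symbolesNonConsideres : List String) : String × Int :=
  let r := aLoop symboleFinLigne symbolesNonConsideres chaine.toList [] 0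
  (String.mk r.1, r.2)

-- ===== PORT B =====
def findCut (fin : String) (syms : List String) : List Char → Nat
  | [] => 0
  | c :: rest =>
    if String.mk [c] ∈ syms then findCut fin syms rest + 1
    else if String.mk [c] = fin then 0
    else findCut fin syms rest + 1

def recupereLigne_alt (chaine : String) (symboleFinLigne : String) (symbolesNonConsideres : List String) : String × Int :=
  let cut := findCut symboleFinLigne symbolesNonConsideres chaine.toList
  let ligne := String.mk (((chaine.toList.take cut).filter (fun c => String.mk [c] ∉ symbolesNonConsideres)))
  (ligne, (cut : Int))

-- ===== PRECONDITION & SPEC =====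
def Spec_recupereLigne (chaine : String) (symboleFinLigne : String) (symbolesNonConsideres : List String) (out : String × Int) : Prop := out = recupereLigne_alt chaine symboleFinLigne symbolesNonConsideres
instance (chaine : String) (symboleFinLigne : String) (symbolesNonConsideres : List String) (out : String × Int) : Decidable (Spec_recupereLigne chaine symboleFinLigne symbolesNonConsideres out) := by unfold Spec_recupereLigne; infer_instance

-- ===== CLAIM (what is proved, stated in full; the proofs are below) =====
def Claim_equal_recupereLigne : Prop := ∀ (chaine : String) (symboleFinLigne : String) (symbolesNonConsideres : List String), Dom_recupereLigne chaine symboleFinLigne symbolesNonConsideres → Spec_recupereLigne chaine symboleFinLigne symbolesNonConsideres (recupereLigne chaine symboleFinLigne symbolesNonConsideres)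

-- ===== LEMMAS AND PROOFS =====


lemma aLoop_eq (fin : String) (syms : List String) :
    ∀ (cs ligne : List Char) (k : Int),
      aLoop fin syms cs ligne k =
        (ligne ++ (cs.take (findCut fin syms cs)).filter (fun c => String.mk [c] ∉ syms),
         k + (findCut fin syms cs : Int)) := by
  intro cs
  induction cs with
  | nil => intro ligne k; simp [aLoop, findCut]
  | cons c rest ih =>
    intro ligne k
    by_cases hmem : String.mk [c] ∈ syms
    · simp only [aLoop, findCut, if_pos hmem, ih, List.take_succ_cons, List.filter_cons,
        Prod.mk.injEq]
      refine ⟨by simp [hmem], by push_cast; ring⟩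
    · by_cases hfin : String.mk [c] = fin
      · simp only [aLoop, findCut, if_neg hmem, if_pos hfin]
        rw [if_neg (fun h => h hfin)]
        simp
      · simp only [aLoop, findCut, if_neg hmem, if_neg hfin, if_pos hfin, ih,
          List.take_succ_cons, List.filter_cons, Prod.mk.injEq]
        refine ⟨by simp [hmem], by push_cast; ring⟩

-- ===== VERDICT (by name: the statement is the Claim_ definition above) =====
theorem recupereLigne_spec : Claim_equal_recupereLigne := by
  intro chaine fin syms _
  unfold Spec_recupereLigne recupereLigne recupereLigne_alt
  simp [aLoop_eq]
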